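-- pv_equiv track=rewrite | github.com/yarbsemaj/Conect_4 | Game.py | checkUpLeft
-- ===== SOURCE A (Python) =====
-- def checkUpLeft(deapth, col, row, player,board):
--     if col <= 0 or row <= 0:
--          return deapth
--     try:
--         cell = board[row-1][col-1]
--     except:
--         return deapth
--
--     if cell != player:
--         return deapth
--     deapth = deapth+1
--     return checkUpLeft(deapth,col-1,row-1,player,board)
-- ===== SOURCE B (Python) =====
-- def checkUpLeft(deapth, col, row, player, board):
--     run = 0
--     r = row - 1
--     c = col - 1
--     while r >= 0 and c >= 0 and r < len(board) and c < len(board[r]) and board[r][c] == player: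
--         run += 1
--         r -= 1
--         c -= 1
--     return deapth + run
-- ===== Notes on version B (the rewrite author's own statement) =====
-- stated objective: simpler
-- what changed: Replaces the tail recursion with try/except probing by a single iterative while loop with explicit bounds checks that counts the run of matching diagonal cells and adds it to deapth once.
import Mathlib
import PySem

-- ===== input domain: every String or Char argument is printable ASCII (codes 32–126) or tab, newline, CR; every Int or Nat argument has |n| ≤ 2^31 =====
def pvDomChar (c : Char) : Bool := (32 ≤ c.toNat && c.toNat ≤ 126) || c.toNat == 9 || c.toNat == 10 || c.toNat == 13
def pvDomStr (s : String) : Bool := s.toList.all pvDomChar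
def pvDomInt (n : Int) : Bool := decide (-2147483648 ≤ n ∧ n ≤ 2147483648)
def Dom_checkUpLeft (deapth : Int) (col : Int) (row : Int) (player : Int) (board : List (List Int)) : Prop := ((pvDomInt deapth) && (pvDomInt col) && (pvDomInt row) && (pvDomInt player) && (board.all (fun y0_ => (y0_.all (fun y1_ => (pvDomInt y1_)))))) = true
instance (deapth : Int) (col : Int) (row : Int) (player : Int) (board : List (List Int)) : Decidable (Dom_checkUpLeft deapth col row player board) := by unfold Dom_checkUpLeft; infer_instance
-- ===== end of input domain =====

-- B replaces A's tail recursion with try/except by one while loop with explicit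
-- bounds checks that counts the matching diagonal run (objective: simpler).

-- ===== PORT A =====
-- literal transliteration of A: the bare 'except' can only be an IndexError on
-- this argument type, ported as the 'none' case of the chained pyGet?.
def checkUpLeft (deapth : Int) (col : Int) (row : Int) (player : Int) (board : List (List Int)) : Int :=
  if col ≤ 0 ∨ row ≤ 0 then deapth
  else
    match (PySem.List.pyGet? board (row - 1)).bind
            (fun rw => PySem.List.pyGet? rw (col - 1)) with
    | none => deapth
    | some cell =>
      if cell ≠ player then deapth
      else checkUpLeft (deapth + 1) (col - 1) (row - 1) player board
termination_by row.toNat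
decreasing_by omega

-- ===== PORT B =====
-- the while loop of Source B: condition checks bounds explicitly, then indexes.
def pvAltLoop (run : Int) (r : Int) (c : Int) (player : Int) (board : List (List Int)) : Int :=
  if h : 0 ≤ r ∧ 0 ≤ c ∧ r < (board.length : Int) ∧
         c < ((board.getD r.toNat []).length : Int) ∧
         (board.getD r.toNat []).getD c.toNat 0 = player then
    pvAltLoop (run + 1) (r - 1) (c - 1) player board
  else run
termination_by (r + 1).toNat
decreasing_by omega

def checkUpLeft_alt (deapth : Int) (col : Int) (row : Int) (player : Int) (board : List (List Int)) : Int :=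
  deapth + pvAltLoop 0 (row - 1) (col - 1) player board

-- ===== PRECONDITION & SPEC =====
def Spec_checkUpLeft (deapth : Int) (col : Int) (row : Int) (player : Int) (board : List (List Int)) (out : Int) : Prop := out = checkUpLeft_alt deapth col row player board
instance (deapth : Int) (col : Int) (row : Int) (player : Int) (board : List (List Int)) (out : Int) : Decidable (Spec_checkUpLeft deapth col row player board out) := by unfold Spec_checkUpLeft; infer_instance

-- ===== CLAIM (what is proved, stated in full; the proofs are below) =====
def Claim_equal_checkUpLeft : Prop := ∀ (deapth : Int) (col : Int) (row : Int) (player : Int) (board : List (List Int)), Dom_checkUpLeft deapth col row player board → Spec_checkUpLeft deapth col row player board (checkUpLeft deapth col row player board)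

-- ===== LEMMAS AND PROOFS =====

-- the loop accumulator just adds up
lemma pvAltLoop_acc (n : Nat) : ∀ (run r c player : Int) (board : List (List Int)),
    (r + 1).toNat ≤ n →
    pvAltLoop run r c player board = run + pvAltLoop 0 r c player board := by
  induction n with
  | zero =>
    intro run r c player board hn
    have hx : ¬(0 ≤ r ∧ 0 ≤ c ∧ r < (board.length : Int) ∧
        c < ((board.getD r.toNat []).length : Int) ∧
        (board.getD r.toNat []).getD c.toNat 0 = player) := by rintro ⟨h1, -⟩; omega
    rw [pvAltLoop, dif_neg hx]
    conv_rhs => rw [pvAltLoop, dif_neg hx]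
    omega
  | succ n ih =>
    intro run r c player board hn
    by_cases h : 0 ≤ r ∧ 0 ≤ c ∧ r < (board.length : Int) ∧
        c < ((board.getD r.toNat []).length : Int) ∧
        (board.getD r.toNat []).getD c.toNat 0 = player
    · rw [pvAltLoop, dif_pos h]
      conv_rhs => rw [pvAltLoop, dif_pos h]
      rw [ih (run + 1) (r - 1) (c - 1) player board (by omega),
          ih (0 + 1) (r - 1) (c - 1) player board (by omega)]
      omega
    · rw [pvAltLoop, dif_neg h]
      conv_rhs => rw [pvAltLoop, dif_neg h]
      omega

-- the A-side lookup succeeds with value v iff B's bounds checks pass and getD gives v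
lemma pvLookup_eq (board : List (List Int)) (r c : Int) (hr : 0 ≤ r) (hc : 0 ≤ c) :
    (PySem.List.pyGet? board r).bind (fun rw => PySem.List.pyGet? rw c)
      = if r < (board.length : Int) ∧ c < ((board.getD r.toNat []).length : Int)
        then some ((board.getD r.toNat []).getD c.toNat 0)
        else none := by
  rw [PySem.List.pyGet?_of_nonneg board hr]
  by_cases h1 : r.toNat < board.length
  · rw [List.getElem?_eq_getElem h1]
    simp only [Option.bind_some]
    rw [PySem.List.pyGet?_of_nonneg _ hc]
    have hget : board.getD r.toNat [] = board[r.toNat] := List.getD_eq_getElem board [] h1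
    by_cases h2 : c.toNat < board[r.toNat].length
    · rw [List.getElem?_eq_getElem h2, if_pos (by constructor <;> [omega; (rw [hget]; omega)])]
      rw [hget, List.getD_eq_getElem _ 0 h2]
    · rw [List.getElem?_eq_none_iff.mpr (by omega), if_neg (by rw [hget]; rintro ⟨-, h⟩; omega)]
  · rw [List.getElem?_eq_none_iff.mpr (by omega)]
    rw [if_neg (by rintro ⟨h, -⟩; omega)]
    rfl

lemma checkUpLeft_eq_loop (deapth col row player : Int) (board : List (List Int)) :
    checkUpLeft deapth col row player board
      = deapth + pvAltLoop 0 (row - 1) (col - 1) player board := by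
  induction deapth, col, row using checkUpLeft.induct player board with
  | case1 deapth col row h =>
    rw [checkUpLeft, if_pos h, pvAltLoop, dif_neg (by rintro ⟨h1, h2, -⟩; omega)]
    omega
  | case2 deapth col row h heq =>
    rw [checkUpLeft, if_neg h, heq]
    show deapth = deapth + pvAltLoop 0 (row - 1) (col - 1) player board
    rw [pvLookup_eq board (row - 1) (col - 1) (by omega) (by omega)] at heq
    split at heq
    · simp at heq
    · rename_i hcond
      rw [pvAltLoop, dif_neg (by rintro ⟨h1, h2, h3, h4, -⟩; exact hcond ⟨h3, h4⟩)]
      omega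
  | case3 deapth col row h cell heq hne =>
    rw [checkUpLeft, if_neg h, heq]
    show (if cell ≠ player then deapth else checkUpLeft (deapth + 1) (col - 1) (row - 1) player board)
        = deapth + pvAltLoop 0 (row - 1) (col - 1) player board
    rw [if_pos hne]
    rw [pvLookup_eq board (row - 1) (col - 1) (by omega) (by omega)] at heq
    split at heq
    · rename_i hcond
      injection heq with heq'
      rw [pvAltLoop, dif_neg (by rintro ⟨h1, h2, h3, h4, h5⟩; exact hne (by omega))]
      omega
    · exact absurd heq (by simp)
  | case4 deapth col row h cell heq hne ih =>
    rw [checkUpLeft, if_neg h, heq]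
    show (if cell ≠ player then deapth else checkUpLeft (deapth + 1) (col - 1) (row - 1) player board)
        = deapth + pvAltLoop 0 (row - 1) (col - 1) player board
    rw [if_neg hne, ih]
    rw [pvLookup_eq board (row - 1) (col - 1) (by omega) (by omega)] at heq
    split at heq
    · rename_i hcond
      have hcp : cell = player := by by_contra hx; exact hne hx
      injection heq with heq'
      conv_rhs => rw [pvAltLoop]
      rw [dif_pos ⟨by omega, by omega, hcond.1, hcond.2, by omega⟩]
      rw [pvAltLoop_acc (row - 1 - 1 + 1).toNat (0 + 1) (row - 1 - 1) (col - 1 - 1) player board le_rfl]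
      omega
    · exact absurd heq (by simp)

-- ===== VERDICT (by name: the statement is the Claim_ definition above) =====
theorem checkUpLeft_spec : Claim_equal_checkUpLeft := by
  intro deapth col row player board _
  unfold Spec_checkUpLeft checkUpLeft_alt
  exact checkUpLeft_eq_loop deapth col row player board
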